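-- pv_equiv track=rewrite | github.com/jianfch/tw-dl | tw-dl.py | cut_line
-- ===== SOURCE A (Python) =====
-- def cut_line(line, begin, end):
--     temp_line_b = line.split(begin)[0]
--     temp_line_e = line.split(end)
--     fixed_line_e = ''
--     for i in range(len(temp_line_e)):
--         if i == 1:
--             fixed_line_e += temp_line_e[i]
--         elif i > 1:
--             fixed_line_e += end + temp_line_e[i]
--
--     return temp_line_b + fixed_line_e
-- ===== SOURCE B (Python) =====
-- def cut_line(line, begin, end):
--     return line.partition(begin)[0] + line.partition(end)[2]
-- ===== Notes on version B (the rewrite author's own statement) =====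
-- stated objective: simpler
-- what changed: B replaces A's split-into-all-pieces plus index-based rejoin loop by two first-occurrence str.partition calls (text before first begin + text after first end), with no loop and no intermediate piece list; like A it raises ValueError on an empty separator.
import Mathlib
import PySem

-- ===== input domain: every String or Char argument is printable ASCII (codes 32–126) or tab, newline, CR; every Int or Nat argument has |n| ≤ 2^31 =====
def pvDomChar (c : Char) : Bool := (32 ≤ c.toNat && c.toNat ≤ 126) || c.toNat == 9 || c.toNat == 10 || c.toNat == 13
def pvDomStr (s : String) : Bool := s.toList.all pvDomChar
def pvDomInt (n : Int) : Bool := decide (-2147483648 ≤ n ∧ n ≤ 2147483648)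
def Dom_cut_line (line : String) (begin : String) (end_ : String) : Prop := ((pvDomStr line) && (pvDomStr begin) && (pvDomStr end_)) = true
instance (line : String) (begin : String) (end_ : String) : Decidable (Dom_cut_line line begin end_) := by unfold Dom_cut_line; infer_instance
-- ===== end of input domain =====

-- B replaces A's split-everything-then-rejoin loop by two first-occurrence str.partition calls (simpler; no loop, no piece list).

-- ===== PORT A =====
-- line.split(begin)[0]; line.split(end); loop rejoining all pieces after the first with end.
def cut_line (line : String) (begin : String) (end_ : String) : String :=
  let temp_line_b := PySem.List.pyGetD ((PySem.Chars.split? line.toList begin.toList).getD []) 0 []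
  let temp_line_e := (PySem.Chars.split? line.toList end_.toList).getD []
  let fixed_line_e := (PySem.List.enumerate temp_line_e).foldl
      (fun acc p => if p.1 == 1 then acc ++ p.2 else if 1 < p.1 then acc ++ end_.toList ++ p.2 else acc) []
  String.ofList (temp_line_b ++ fixed_line_e)

-- ===== PORT B =====
-- str.partition ported by hand (exact for nonempty sep: first-occurrence split;
-- Python raises ValueError on an empty sep, which Pre_ excludes).
def pyPartition (l sep : List Char) : List Char × List Char × List Char :=
  let i := PySem.Chars.find l sep
  if i < 0 then (l, [], [])
  else (PySem.Chars.slice l none (some i), sep, PySem.Chars.slice l (some (i + (sep.length : Int))) none)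

-- line.partition(begin)[0] + line.partition(end)[2]
def cut_line_alt (line : String) (begin : String) (end_ : String) : String :=
  String.ofList ((pyPartition line.toList begin.toList).1 ++ (pyPartition line.toList end_.toList).2.2)

-- ===== PRECONDITION & SPEC =====
-- Pre_ excludes only empty separators: there both A's str.split and B's str.partition raise ValueError.
def Pre_cut_line (line : String) (begin : String) (end_ : String) : Prop := begin ≠ "" ∧ end_ ≠ ""
instance (line : String) (begin : String) (end_ : String) : Decidable (Pre_cut_line line begin end_) := by unfold Pre_cut_line; infer_instance

def pvWitness_cut_line : String × String × String := ("a<b>c", "<", ">")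

def Spec_cut_line (line : String) (begin : String) (end_ : String) (out : String) : Prop := out = cut_line_alt line begin end_
instance (line : String) (begin : String) (end_ : String) (out : String) : Decidable (Spec_cut_line line begin end_ out) := by unfold Spec_cut_line; infer_instance

-- ===== CLAIM (what is proved, stated in full; the proofs are below) =====
def Claim_equal_cut_line : Prop := ∀ (line : String) (begin : String) (end_ : String), Dom_cut_line line begin end_ → Pre_cut_line line begin end_ → Spec_cut_line line begin end_ (cut_line line begin end_)

-- ===== LEMMAS AND PROOFS =====

-- the text before the first occurrence of sep (the whole string if absent)
def beforeL (sep l : List Char) : List Char :=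
  if PySem.Chars.find l sep = -1 then l else List.take (PySem.Chars.find l sep).toNat l

-- the text after the first occurrence of sep ([] if absent)
def afterL (sep l : List Char) : List Char :=
  if PySem.Chars.find l sep = -1 then [] else List.drop ((PySem.Chars.find l sep).toNat + sep.length) l

lemma go_step (sep : List Char) (fuel : Nat) (c : Char) (l cur : List Char) (acc : List (List Char)) :
    PySem.Chars.splitOn.go sep (fuel+1) (c::l) cur acc =
      (if sep.isPrefixOf (c::l) then PySem.Chars.splitOn.go sep fuel (List.drop sep.length (c::l)) [] (cur.reverse :: acc)
       else PySem.Chars.splitOn.go sep fuel l (c :: cur) acc) := by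
  rw [PySem.Chars.splitOn.go.eq_def]

lemma go_nil (sep : List Char) (fuel : Nat) (cur : List Char) (acc : List (List Char)) :
    PySem.Chars.splitOn.go sep (fuel+1) [] cur acc = (cur.reverse :: acc).reverse := by
  rw [PySem.Chars.splitOn.go.eq_def]

lemma go_ne_nil (sep : List Char) (fuel : Nat) (l cur : List Char) (acc : List (List Char)) :
    PySem.Chars.splitOn.go sep fuel l cur acc ≠ [] := by
  induction fuel generalizing l cur acc with
  | zero => rw [PySem.Chars.splitOn.go.eq_def]; simp
  | succ f ih =>
    cases l with
    | nil => rw [go_nil]; simp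
    | cons c t =>
      rw [go_step]
      split
      · exact ih _ _ _
      · exact ih _ _ _

lemma go_acc (sep : List Char) (fuel : Nat) (l cur : List Char) (acc : List (List Char)) :
    PySem.Chars.splitOn.go sep fuel l cur acc = acc.reverse ++ PySem.Chars.splitOn.go sep fuel l cur [] := by
  induction fuel generalizing l cur acc with
  | zero => rw [PySem.Chars.splitOn.go.eq_def, PySem.Chars.splitOn.go.eq_def]; simp
  | succ f ih =>
    cases l with
    | nil => rw [go_nil, go_nil]; simp
    | cons c t =>
      rw [go_step, go_step]
      split
      · rw [ih _ _ (cur.reverse :: acc), ih _ _ ([cur.reverse])]; simp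
      · rw [ih _ _ acc]

lemma go_cur (sep : List Char) (fuel : Nat) (l cur : List Char) :
    PySem.Chars.splitOn.go sep fuel l cur [] =
      (cur.reverse ++ (PySem.Chars.splitOn.go sep fuel l [] []).headI) :: (PySem.Chars.splitOn.go sep fuel l [] []).tail := by
  induction fuel generalizing l cur with
  | zero => rw [PySem.Chars.splitOn.go.eq_def, PySem.Chars.splitOn.go.eq_def]; simp
  | succ f ih =>
    cases l with
    | nil => rw [go_nil, go_nil]; simp
    | cons c t =>
      rw [go_step, go_step]
      split
      · rw [go_acc _ _ _ _ [cur.reverse], go_acc _ _ _ _ [List.reverse []]]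
        simp
      · rw [ih t (c :: cur), ih t [c]]
        simp

lemma find_eq_of (l sep : List Char) (n : Nat) (h1 : sep <+: l.drop n) (h2 : ∀ j < n, ¬ sep <+: l.drop j) :
    PySem.Chars.find l sep = n := by
  have hinf : sep <:+: l := h1.isInfix.trans (List.drop_suffix n l).isInfix
  have hnn : 0 ≤ PySem.Chars.find l sep := (PySem.Chars.find_nonneg_iff _ _).2 hinf
  obtain ⟨hpre, hmin⟩ := PySem.Chars.find_spec hnn
  set m := (PySem.Chars.find l sep).toNat with hm
  have : m = n := by
    rcases Nat.lt_trichotomy m n with h | h | h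
    · exact absurd hpre (h2 m h)
    · exact h
    · exact absurd h1 (hmin n h)
  omega

lemma find_zero_of_prefix (l sep : List Char) (h : sep <+: l) : PySem.Chars.find l sep = 0 :=
  find_eq_of l sep 0 (by simpa using h) (by omega)

lemma find_cons (c : Char) (l sep : List Char) (hnp : ¬ sep <+: (c :: l)) :
    PySem.Chars.find (c :: l) sep =
      (if PySem.Chars.find l sep = -1 then -1 else PySem.Chars.find l sep + 1) := by
  by_cases h : PySem.Chars.find l sep = -1
  · simp only [h, if_pos]
    rw [PySem.Chars.find_eq_neg_one_iff] at h ⊢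
    intro hinf
    rcases List.infix_cons_iff.1 hinf with hp | hi
    · exact hnp hp
    · exact h hi
  · simp only [h, if_neg, ite_false]
    have hnn : 0 ≤ PySem.Chars.find l sep := by
      have := PySem.Chars.neg_one_le_find l sep
      omega
    obtain ⟨hpre, hmin⟩ := PySem.Chars.find_spec hnn
    have := find_eq_of (c :: l) sep ((PySem.Chars.find l sep).toNat + 1)
      (by simpa using hpre)
      (by
        intro j hj
        cases j with
        | zero => simpa using hnp
        | succ k =>
          simp only [List.drop_succ_cons]
          exact hmin k (by omega))
    omega

lemma beforeL_cons (sep : List Char) (c : Char) (t : List Char) (hnp : ¬ sep <+: (c :: t)) :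
    beforeL sep (c :: t) = c :: beforeL sep t := by
  have hfc := find_cons c t sep hnp
  by_cases h : PySem.Chars.find t sep = -1
  · rw [h] at hfc; simp at hfc
    simp [beforeL, h, hfc]
  · have hnn : 0 ≤ PySem.Chars.find t sep := by
      have := PySem.Chars.neg_one_le_find t sep
      omega
    have h1 : PySem.Chars.find (c :: t) sep = PySem.Chars.find t sep + 1 := by
      rw [hfc]; simp [h]
    have hne : PySem.Chars.find (c :: t) sep ≠ -1 := by omega
    simp only [beforeL, h, hne, ite_false]
    rw [h1, show (PySem.Chars.find t sep + 1).toNat = (PySem.Chars.find t sep).toNat + 1 by omega,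
      List.take_succ_cons]

lemma afterL_cons (sep : List Char) (c : Char) (t : List Char) (hnp : ¬ sep <+: (c :: t)) :
    afterL sep (c :: t) = afterL sep t := by
  have hfc := find_cons c t sep hnp
  by_cases h : PySem.Chars.find t sep = -1
  · rw [h] at hfc; simp at hfc
    simp [afterL, h, hfc]
  · have hnn : 0 ≤ PySem.Chars.find t sep := by
      have := PySem.Chars.neg_one_le_find t sep
      omega
    have h1 : PySem.Chars.find (c :: t) sep = PySem.Chars.find t sep + 1 := by
      rw [hfc]; simp [h]
    have hne : PySem.Chars.find (c :: t) sep ≠ -1 := by omega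
    simp only [afterL, h, hne, ite_false]
    rw [h1, show (PySem.Chars.find t sep + 1).toNat + sep.length
          = ((PySem.Chars.find t sep).toNat + sep.length) + 1 by omega,
      List.drop_succ_cons]

lemma go_recon (sep : List Char) (hsep : sep ≠ []) (fuel : Nat) (l : List Char) (hl : l.length < fuel) :
    PySem.Chars.join sep (PySem.Chars.splitOn.go sep fuel l [] []) = l := by
  induction fuel generalizing l with
  | zero => omega
  | succ f ih =>
    cases l with
    | nil => rw [go_nil]; simpa using PySem.Chars.join_singleton sep []
    | cons c t =>
      rw [go_step]
      split
      · rename_i hp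
        have hp' : sep <+: (c :: t) := by simpa using hp
        obtain ⟨r, hr⟩ := hp'
        have hdrop : List.drop sep.length (c :: t) = r := by
          rw [← hr, List.drop_left]
        rw [go_acc]
        have hlen : r.length < f := by
          have hsum : sep.length + r.length = (c :: t).length := by rw [← hr]; simp
          have hs1 : 1 ≤ sep.length := by
            cases sep with
            | nil => exact absurd rfl hsep
            | cons a b => simp
          simp only [List.length_cons] at hsum hl
          omega
        rw [hdrop]
        obtain ⟨h, tl, hg⟩ : ∃ h tl, PySem.Chars.splitOn.go sep f r [] [] = h :: tl := by
          cases hgo : PySem.Chars.splitOn.go sep f r [] [] with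
          | nil => exact absurd hgo (go_ne_nil sep f r [] [])
          | cons h tl => exact ⟨h, tl, rfl⟩
        rw [hg]
        simp only [List.reverse_cons, List.reverse_nil, List.nil_append]
        rw [show ([[]] : List (List Char)) ++ h :: tl = [] :: h :: tl from rfl]
        rw [PySem.Chars.join_cons_cons]
        rw [← hg, ih r hlen, ← hr]
        simp
      · rw [go_cur]
        obtain ⟨h, tl, hg⟩ : ∃ h tl, PySem.Chars.splitOn.go sep f t [] [] = h :: tl := by
          cases hgo : PySem.Chars.splitOn.go sep f t [] [] with
          | nil => exact absurd hgo (go_ne_nil sep f t [] [])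
          | cons h tl => exact ⟨h, tl, rfl⟩
        rw [hg]
        simp only [List.headI, List.tail]
        have htl : t.length < f := by simp at hl; omega
        have hrec := ih t htl
        rw [hg] at hrec
        cases tl with
        | nil =>
          rw [PySem.Chars.join_singleton] at hrec ⊢
          simp [hrec]
        | cons q tl' =>
          rw [PySem.Chars.join_cons_cons] at hrec ⊢
          simp [hrec]

lemma go_main (sep : List Char) (hsep : sep ≠ []) (fuel : Nat) (l : List Char) (hl : l.length < fuel) :
    (PySem.Chars.splitOn.go sep fuel l [] []).headI = beforeL sep l ∧
    PySem.Chars.join sep (PySem.Chars.splitOn.go sep fuel l [] []).tail = afterL sep l := by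
  induction fuel generalizing l with
  | zero => omega
  | succ f ih =>
    cases l with
    | nil =>
      rw [go_nil]
      have hf : PySem.Chars.find [] sep = -1 := by
        rw [PySem.Chars.find_eq_neg_one_iff]
        intro h
        exact hsep (List.eq_nil_of_infix_nil h)
      refine ⟨by simp [beforeL, hf], ?_⟩
      have h0 : PySem.Chars.join sep ((([] : List Char).reverse :: []).reverse).tail = [] := rfl
      rw [h0]
      simp [afterL, hf]
    | cons c t =>
      rw [go_step]
      split
      · rename_i hp
        have hp' : sep <+: (c :: t) := by simpa using hp
        have hf : PySem.Chars.find (c :: t) sep = 0 := find_zero_of_prefix _ _ hp'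
        obtain ⟨r, hr⟩ := hp'
        have hdrop : List.drop sep.length (c :: t) = r := by
          rw [← hr, List.drop_left]
        have hlen : r.length < f := by
          have hsum : sep.length + r.length = (c :: t).length := by rw [← hr]; simp
          have hs1 : 1 ≤ sep.length := by
            cases sep with
            | nil => exact absurd rfl hsep
            | cons a b => simp
          simp only [List.length_cons] at hsum hl
          omega
        rw [go_acc, hdrop]
        constructor
        · simp [beforeL, hf]
        · simp only [List.reverse_cons, List.reverse_nil, List.nil_append]
          rw [show (([[]] : List (List Char)) ++ PySem.Chars.splitOn.go sep f r [] []).tail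
                = PySem.Chars.splitOn.go sep f r [] [] from rfl]
          rw [go_recon sep hsep f r hlen]
          simp only [afterL, hf]
          norm_num
          exact hdrop.symm
      · rename_i hp
        have hnp : ¬ sep <+: (c :: t) := by simpa using hp
        have htl : t.length < f := by simp only [List.length_cons] at hl; omega
        obtain ⟨ihh, iht⟩ := ih t htl
        rw [go_cur]
        constructor
        · simp only [List.headI_cons, List.reverse_cons, List.reverse_nil, List.nil_append,
            List.singleton_append, ihh]
          exact (beforeL_cons sep c t hnp).symm
        · simp only [List.tail_cons, iht]
          exact (afterL_cons sep c t hnp).symm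

lemma splitOn_main (sep l : List Char) (hsep : sep ≠ []) :
    (PySem.Chars.splitOn l sep).headI = beforeL sep l ∧
    PySem.Chars.join sep (PySem.Chars.splitOn l sep).tail = afterL sep l := by
  unfold PySem.Chars.splitOn
  exact go_main sep hsep (l.length + 1) l (by omega)

lemma splitOn_ne_nil (sep l : List Char) : PySem.Chars.splitOn l sep ≠ [] := by
  unfold PySem.Chars.splitOn
  exact go_ne_nil _ _ _ _ _

-- the rejoining loop over indexes ≥ 2, in closed form
lemma join_flatten (sep q : List Char) (rest : List (List Char)) :
    PySem.Chars.join sep (q :: rest) = q ++ (rest.map (fun p => sep ++ p)).flatten := by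
  induction rest generalizing q with
  | nil => simp [PySem.Chars.join_singleton]
  | cons r rest' ih => rw [PySem.Chars.join_cons_cons, ih r]; simp

lemma enumerate_cons {α : Type} (x : α) (t : List α) (k : Int) :
    PySem.List.enumerate (x :: t) k = (k, x) :: PySem.List.enumerate t (k + 1) := by
  rw [PySem.List.enumerate]

lemma enumerate_nil {α : Type} (k : Int) : PySem.List.enumerate ([] : List α) k = [] := by
  rw [PySem.List.enumerate]

lemma loop_tail_aux (sep : List Char) (rest : List (List Char)) (k : Int) (hk : 2 ≤ k) (acc : List Char) :
    (PySem.List.enumerate rest k).foldl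
        (fun acc p => if p.1 == 1 then acc ++ p.2 else if 1 < p.1 then acc ++ sep ++ p.2 else acc) acc
      = acc ++ (rest.map (fun p => sep ++ p)).flatten := by
  induction rest generalizing k acc with
  | nil => rw [enumerate_nil]; simp
  | cons r rest' ih =>
    rw [enumerate_cons, List.foldl_cons]
    have h1 : (k == 1) = false := by simp; omega
    have h2 : 1 < k := by omega
    simp only [h1, if_pos, h2, ite_true, Bool.false_eq_true, ite_false]
    rw [ih (k + 1) (by omega)]
    simp

lemma loop_tail (sep : List Char) (pieces : List (List Char)) (hne : pieces ≠ []) :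
    (PySem.List.enumerate pieces 0).foldl
        (fun acc p => if p.1 == 1 then acc ++ p.2 else if 1 < p.1 then acc ++ sep ++ p.2 else acc) []
      = PySem.Chars.join sep pieces.tail := by
  cases pieces with
  | nil => exact absurd rfl hne
  | cons p rest =>
    rw [enumerate_cons, List.foldl_cons]
    have e0 : (if ((((0 : Int), p)).1 == 1) = true then ([] : List Char) ++ (((0 : Int), p)).2
        else if 1 < (((0 : Int), p)).1 then [] ++ sep ++ (((0 : Int), p)).2 else []) = [] := by
      norm_num
    rw [e0]
    cases rest with
    | nil => rw [enumerate_nil]; simp [PySem.Chars.join, List.intercalate]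
    | cons q rest' =>
      rw [enumerate_cons, List.foldl_cons]
      have e1 : (if ((((0 + 1 : Int), q)).1 == 1) = true then ([] : List Char) ++ (((0 + 1 : Int), q)).2
          else if 1 < (((0 + 1 : Int), q)).1 then [] ++ sep ++ (((0 + 1 : Int), q)).2 else []) = q := by
        norm_num
      rw [e1]
      have h2 : (0 : Int) + 1 + 1 = 2 := by norm_num
      rw [h2, loop_tail_aux sep rest' 2 (by omega)]
      rw [List.tail_cons, join_flatten]

-- ===== VERDICT (by name: the statement is the Claim_ definition above) =====
theorem cut_line_spec : Claim_equal_cut_line := by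
  intro line begin end_ _ hpre
  obtain ⟨hb, he⟩ := hpre
  have hb' : begin.toList ≠ [] := fun h => hb (by
    have := congrArg String.ofList h
    simpa using this)
  have he' : end_.toList ≠ [] := fun h => he (by
    have := congrArg String.ofList h
    simpa using this)
  unfold Spec_cut_line cut_line cut_line_alt pyPartition
  have hbe : begin.toList.isEmpty = false := by simpa using hb'
  have hee : end_.toList.isEmpty = false := by simpa using he'
  simp only [PySem.Chars.split?, hbe, hee, Bool.false_eq_true, ite_false, Option.getD_some]
  obtain ⟨hheadb, -⟩ := splitOn_main begin.toList line.toList hb'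
  obtain ⟨-, htaile⟩ := splitOn_main end_.toList line.toList he'
  rw [loop_tail end_.toList _ (splitOn_ne_nil _ _), htaile]
  have hgetD : PySem.List.pyGetD (PySem.Chars.splitOn line.toList begin.toList) 0 [] =
      (PySem.Chars.splitOn line.toList begin.toList).headI := by
    cases hsp : PySem.Chars.splitOn line.toList begin.toList with
    | nil => exact absurd hsp (splitOn_ne_nil _ _)
    | cons p rest => simp [PySem.List.pyGetD, PySem.List.pyGet?, PySem.List.pyIdx?]
  rw [hgetD, hheadb]
  congr 1
  congr 1
  · -- before part
    unfold beforeL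
    by_cases h : PySem.Chars.find line.toList begin.toList = -1
    · have : PySem.Chars.find line.toList begin.toList < 0 := by omega
      simp [h, this]
    · have hnn : 0 ≤ PySem.Chars.find line.toList begin.toList := by
        have := PySem.Chars.neg_one_le_find line.toList begin.toList
        omega
      have : ¬ PySem.Chars.find line.toList begin.toList < 0 := by omega
      simp only [h, ite_false, this, if_neg]
      rw [PySem.Chars.slice_eq_listSlice, PySem.List.slice_to _ hnn]
  · -- after part
    unfold afterL
    by_cases h : PySem.Chars.find line.toList end_.toList = -1
    · have : PySem.Chars.find line.toList end_.toList < 0 := by omega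
      simp [h, this]
    · have hnn : 0 ≤ PySem.Chars.find line.toList end_.toList := by
        have := PySem.Chars.neg_one_le_find line.toList end_.toList
        omega
      have : ¬ PySem.Chars.find line.toList end_.toList < 0 := by omega
      simp only [h, ite_false, this, if_neg]
      rw [PySem.Chars.slice_eq_listSlice, PySem.List.slice_from _ (by omega)]
      congr 1
      omega
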